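-- pv_equiv track=rewrite | github.com/PavinWu/RandomSounds | contours_plot_dist.py | generate_all_contours
-- ===== SOURCE A (Python) =====
-- def generate_all_contours(c_len):
--     all_contours = [[] for note in range(7+1)]
--     for init_note in range(7+1):
--         # li = len(all_contours) - 1
--         prev_max = 7-init_note   # max contour change
--         prev_min = -init_note    # min contour change
--         prev_choice = 0
--         pos_contours = get_pos_con(prev_max, prev_min, prev_choice)
--         _gen_aux(all_contours[init_note], [], pos_contours, c_len)
--     return all_contours
--
-- def _gen_aux(all_note_contours, partial_contours, pos_contours, c_len):
--     if len(partial_contours) < c_len: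
--         prev_max = pos_contours[-1]     # max(pos_contours)
--         prev_min = pos_contours[0]      # min(pos_contours)
--         for contour in pos_contours:
--             x = list(partial_contours)
--             x.append(contour)
--             prev_choice = contour
--             new_pos_contours = get_pos_con(prev_max, prev_min, prev_choice)
--             _gen_aux(all_note_contours, x, new_pos_contours, c_len)
--     else:
--         all_note_contours.append(partial_contours)
--
-- def get_pos_con(prev_max, prev_min, prev_choice):
--     """ get all possible contours """
--     new_min, new_max = prev_min-prev_choice, prev_max-prev_choice
--     return range(new_min, new_max+1)
-- ===== SOURCE B (Python) =====
-- def generate_all_contours(c_len):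
--     all_contours = []
--     for init_note in range(8):
--         partials = [([], init_note)]
--         for _ in range(c_len):
--             partials = [(seq + [d], n + d)
--                         for (seq, n) in partials
--                         for d in range(-n, 8 - n)]
--         all_contours.append([seq for seq, _ in partials])
--     return all_contours
-- ===== Notes on version B (the rewrite author's own statement) =====
-- stated objective: simpler
-- what changed: Replaces the recursive DFS with prev_max/prev_min/prev_choice bookkeeping by an iterative layered build over c_len rounds, using the invariant that the valid deltas at current note n are exactly range(-n, 8-n).
import Mathlib
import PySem

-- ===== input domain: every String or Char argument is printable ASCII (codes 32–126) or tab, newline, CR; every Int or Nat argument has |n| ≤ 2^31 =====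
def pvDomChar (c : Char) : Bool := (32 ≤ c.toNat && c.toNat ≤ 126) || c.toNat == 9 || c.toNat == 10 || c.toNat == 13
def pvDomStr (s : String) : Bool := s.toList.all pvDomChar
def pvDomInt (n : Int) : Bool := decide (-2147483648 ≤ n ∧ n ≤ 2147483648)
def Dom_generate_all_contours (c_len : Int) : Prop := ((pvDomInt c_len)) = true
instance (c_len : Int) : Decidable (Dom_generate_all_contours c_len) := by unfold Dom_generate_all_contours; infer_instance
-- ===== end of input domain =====

-- B rewrites A's recursive DFS (with prev_max/prev_min/prev_choice bookkeeping) as an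
-- iterative layered build using the invariant that valid deltas at note n are range(-n, 8-n);
-- objective: simpler.

-- ===== PORT A =====
def get_pos_con (prev_max prev_min prev_choice : Int) : List Int :=
  PySem.List.pyRange (prev_min - prev_choice) (prev_max - prev_choice + 1) 1

mutual
-- _gen_aux; the list `all_note_contours` that Python mutates is threaded as `acc`.
-- `pos` is provably never empty (a range with min ≤ max), so the `.getD 0` defaults
-- standing for pos_contours[-1] / pos_contours[0] are unreachable (no IndexError).
def gen_aux (acc : List (List Int)) (partialc : List Int) (pos : List Int) (c_len : Int) :
    List (List Int) :=
  if h : (partialc.length : Int) < c_len then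
    let prev_max := (PySem.List.pyGet? pos (-1)).getD 0
    let prev_min := (PySem.List.pyGet? pos 0).getD 0
    gen_loop acc partialc pos prev_max prev_min c_len
  else
    acc ++ [partialc]
termination_by ((c_len - partialc.length).toNat, 0)

-- the `for contour in pos_contours` loop of _gen_aux
def gen_loop (acc : List (List Int)) (partialc : List Int) (rest : List Int)
    (prev_max prev_min : Int) (c_len : Int) : List (List Int) :=
  match rest with
  | [] => acc
  | contour :: rest' =>
    let acc' := gen_aux acc (partialc ++ [contour]) (get_pos_con prev_max prev_min contour) c_len
    gen_loop acc' partialc rest' prev_max prev_min c_len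
termination_by ((c_len - (partialc.length + 1)).toNat, rest.length + 1)
end

def generate_all_contours (c_len : Int) : List (List (List Int)) :=
  (PySem.List.pyRange 0 8 1).map (fun init_note =>
    gen_aux [] [] (get_pos_con (7 - init_note) (-init_note) 0) c_len)

-- ===== PORT B =====
-- one round of B's layered build: expand every (seq, n) by each d in range(-n, 8-n)
def layer_step (partials : List (List Int × Int)) : List (List Int × Int) :=
  partials.flatMap (fun p =>
    (PySem.List.pyRange (-p.2) (8 - p.2) 1).map (fun d => (p.1 ++ [d], p.2 + d)))

def generate_all_contours_alt (c_len : Int) : List (List (List Int)) :=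
  (List.range 8).map (fun i =>
    ((layer_step^[c_len.toNat]) [([], (i : Int))]).map Prod.fst)

-- ===== PRECONDITION & SPEC =====
-- Pre_ excludes very large c_len, where Python A's depth-first recursion (one stack frame
-- per contour step) exceeds CPython's recursion limit and raises RecursionError; it keeps
-- every input on which A actually returns.
def Pre_generate_all_contours (c_len : Int) : Prop := c_len ≤ 900
instance (c_len : Int) : Decidable (Pre_generate_all_contours c_len) := by unfold Pre_generate_all_contours; infer_instance
def pvWitness_generate_all_contours : Int := (2)
def Spec_generate_all_contours (c_len : Int) (out : List (List (List Int))) : Prop := out = generate_all_contours_alt c_len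
instance (c_len : Int) (out : List (List (List Int))) : Decidable (Spec_generate_all_contours c_len out) := by unfold Spec_generate_all_contours; infer_instance

-- ===== CLAIM (what is proved, stated in full; the proofs are below) =====
def Claim_equal_generate_all_contours : Prop := ∀ (c_len : Int), Dom_generate_all_contours c_len → Pre_generate_all_contours c_len → Spec_generate_all_contours c_len (generate_all_contours c_len)

-- ===== LEMMAS AND PROOFS =====

-- DFS expansion of a single (seq, n) for k more levels
def expandP (k : Nat) (p : List Int × Int) : List (List Int × Int) :=
  match k with
  | 0 => [p]
  | k + 1 =>
    (PySem.List.pyRange (-p.2) (8 - p.2) 1).flatMap (fun d => expandP k (p.1 ++ [d], p.2 + d))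

lemma layer_step_iterate (k : Nat) (l : List (List Int × Int)) :
    (layer_step^[k]) l = l.flatMap (expandP k) := by
  induction k generalizing l with
  | zero => simp [expandP]
  | succ k ih =>
    rw [Function.iterate_succ_apply, ih]
    unfold layer_step
    rw [List.flatMap_assoc]
    congr 1; funext p
    rw [List.flatMap_map]
    rfl

lemma pyRange_window (n : Int) :
    PySem.List.pyRange (-n) (8 - n) 1 =
      [-n, 1 - n, 2 - n, 3 - n, 4 - n, 5 - n, 6 - n, 7 - n] := by
  rw [PySem.List.pyRange_one_cons (by omega)]
  rw [PySem.List.pyRange_one_cons (by omega)]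
  rw [PySem.List.pyRange_one_cons (by omega)]
  rw [PySem.List.pyRange_one_cons (by omega)]
  rw [PySem.List.pyRange_one_cons (by omega)]
  rw [PySem.List.pyRange_one_cons (by omega)]
  rw [PySem.List.pyRange_one_cons (by omega)]
  rw [PySem.List.pyRange_one_cons (by omega)]
  rw [PySem.List.pyRange_one_eq_nil (by omega)]
  norm_num
  omega

lemma get_pos_con_window (n d : Int) :
    get_pos_con (7 - n) (-n) d = PySem.List.pyRange (-(n + d)) (8 - (n + d)) 1 := by
  unfold get_pos_con
  congr 1 <;> ring

lemma gen_aux_expand (k : Nat) :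
    ∀ (acc : List (List Int)) (p : List Int) (n : Int) (c_len : Int),
      (c_len - p.length).toNat = k →
      gen_aux acc p (PySem.List.pyRange (-n) (8 - n) 1) c_len =
        acc ++ (expandP k (p, n)).map Prod.fst := by
  induction k with
  | zero =>
    intro acc p n c_len hk
    unfold gen_aux
    rw [dif_neg (by omega)]
    simp [expandP]
  | succ k ih =>
    intro acc p n c_len hk
    unfold gen_aux
    rw [dif_pos (by omega)]
    have hmax : (PySem.List.pyGet? (PySem.List.pyRange (-n) (8 - n) 1) (-1)).getD 0 = 7 - n := by
      rw [pyRange_window]; simp [PySem.List.pyGet?, PySem.List.pyIdx?]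
    have hmin : (PySem.List.pyGet? (PySem.List.pyRange (-n) (8 - n) 1) 0).getD 0 = -n := by
      rw [pyRange_window]; simp [PySem.List.pyGet?, PySem.List.pyIdx?]
    rw [hmax, hmin]
    have hloop : ∀ (rest : List Int) (acc : List (List Int)),
        gen_loop acc p rest (7 - n) (-n) c_len =
          acc ++ rest.flatMap (fun d => (expandP k (p ++ [d], n + d)).map Prod.fst) := by
      intro rest
      induction rest with
      | nil => intro acc; simp [gen_loop]
      | cons d rest' ihr =>
        intro acc
        unfold gen_loop
        rw [get_pos_con_window]
        rw [ih acc (p ++ [d]) (n + d) c_len (by simp; omega)]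
        rw [ihr]
        simp
    rw [hloop]
    simp [expandP, List.map_flatMap]

lemma alt_col (k : Nat) (i : Int) :
    ((layer_step^[k]) [([], i)]).map Prod.fst = (expandP k (([] : List Int), i)).map Prod.fst := by
  rw [layer_step_iterate]
  simp

-- ===== VERDICT (by name: the statement is the Claim_ definition above) =====
theorem generate_all_contours_spec : Claim_equal_generate_all_contours := by
  intro c_len _ _
  unfold Spec_generate_all_contours generate_all_contours generate_all_contours_alt
  have hrange : PySem.List.pyRange 0 8 1 = (List.range 8).map (fun i => (i : Int)) := by decide
  rw [hrange, List.map_map]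
  congr 1; funext i
  show gen_aux [] [] (get_pos_con (7 - (i : Int)) (-(i : Int)) 0) c_len = _
  have h0 : get_pos_con (7 - (i : Int)) (-(i : Int)) 0 =
      PySem.List.pyRange (-(i : Int)) (8 - (i : Int)) 1 := by
    unfold get_pos_con; congr 1 <;> ring
  rw [h0, gen_aux_expand c_len.toNat [] [] (i : Int) c_len (by simp), alt_col]
  simp
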